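-- pv_equiv track=rewrite | github.com/DOMI-CONUS/conodictor | conodictor/conodictor.py | _get_prot_seq_from_cds
-- ===== SOURCE A (Python) =====
-- def _get_prot_seq_from_cds(prot_seq):
--     """
--     _get_prot_seq_from_cds keep all sequences of non-zero length
--     that start with the start codon methionine and end with the stop codon.
--
--     :prot_seq: Peptide sequence to filter
--     """
--     stop_codon = '*'
--     start_codon = 'M'
--     filtered_seqs = []
--     if stop_codon in prot_seq:
--         stop_codon_splits = prot_seq.split(stop_codon)
--         stop_codon_splits.pop()
--         for stop_codon_split in stop_codon_splits:
--             if start_codon in stop_codon_split: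
--                 valid_seq = stop_codon_split.split(start_codon, 1)[1]
--                 if len(valid_seq) > 0:
--                     filtered_seqs.append(start_codon + valid_seq)
--     return filtered_seqs
-- ===== SOURCE B (Python) =====
-- def _get_prot_seq_from_cds(prot_seq):
--     """Single left-to-right scan with a peptide buffer instead of
--     split/pop plus per-fragment membership tests and re-splits."""
--     filtered_seqs = []
--     buf = None  # residues of the current candidate peptide, or None
--     for ch in prot_seq:
--         if ch == '*':
--             if buf is not None and len(buf) > 1:
--                 filtered_seqs.append(''.join(buf))
--             buf = None
--         elif buf is not None:
--             buf.append(ch)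
--         elif ch == 'M':
--             buf = ['M']
--     return filtered_seqs
-- ===== Notes on version B (the rewrite author's own statement) =====
-- stated objective: alternative
-- what changed: Replaced split('*')/pop plus per-fragment 'M' membership tests and a second split('M',1) by a single left-to-right scan that maintains the current candidate peptide in a buffer and emits it at each stop codon.
import Mathlib
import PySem

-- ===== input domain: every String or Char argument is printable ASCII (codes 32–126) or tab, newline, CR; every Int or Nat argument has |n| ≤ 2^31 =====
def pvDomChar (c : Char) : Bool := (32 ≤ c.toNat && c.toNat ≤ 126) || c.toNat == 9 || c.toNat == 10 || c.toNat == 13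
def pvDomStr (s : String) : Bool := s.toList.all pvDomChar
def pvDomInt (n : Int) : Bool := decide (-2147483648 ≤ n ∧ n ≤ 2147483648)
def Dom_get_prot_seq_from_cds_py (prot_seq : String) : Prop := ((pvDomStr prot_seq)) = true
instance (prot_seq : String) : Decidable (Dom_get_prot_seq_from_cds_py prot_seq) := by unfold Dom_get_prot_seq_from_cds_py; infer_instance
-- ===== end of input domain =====

-- B replaces A's split/pop plus per-fragment membership tests and re-splits by a
-- single left-to-right scan with a peptide buffer (alternative decomposition, same cost).


-- ===== PORT A =====
-- A on the character list: `'*' in prot_seq`, split('*'), .pop() (split always returns a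
-- nonempty list, so pop? (-1) always succeeds; the none branch is unreachable), then for
-- each fragment: `'M' in frag`, frag.split('M', 1)[1] (index 1 exists under the guard,
-- rendered with pyGetD), the len > 0 check, and the append of 'M' + valid_seq.
def portACore (s : List Char) : List (List Char) :=
  if PySem.Chars.isIn ['*'] s then
    let splits := PySem.Chars.splitOn s ['*']
    match PySem.List.pop? splits (-1) with
    | none => []        -- unreachable: split never returns []
    | some (_, splits) =>
      splits.foldl (fun acc frag =>
        if PySem.Chars.isIn ['M'] frag then
          if 0 < (PySem.List.pyGetD (PySem.Chars.splitOnMax frag ['M'] 1) 1 []).length then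
            acc ++ ['M' :: PySem.List.pyGetD (PySem.Chars.splitOnMax frag ['M'] 1) 1 []]
          else acc
        else acc) []
  else []

def get_prot_seq_from_cds_py (prot_seq : String) : List String :=
  (portACore prot_seq.toList).map String.ofList

-- ===== PORT B =====
-- B on the character list: one pass, `buf` is the current candidate peptide (or none).
def portBCore (s : List Char) (buf : Option (List Char)) (acc : List (List Char)) :
    List (List Char) :=
  match s with
  | [] => acc
  | c :: t =>
    if c = '*' then
      match buf with
      | some b => if 1 < b.length then portBCore t none (acc ++ [b]) else portBCore t none acc
      | none => portBCore t none acc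
    else
      match buf with
      | some b => portBCore t (some (b ++ [c])) acc
      | none => if c = 'M' then portBCore t (some ['M']) acc else portBCore t none acc

def get_prot_seq_from_cds_py_alt (prot_seq : String) : List String :=
  (portBCore prot_seq.toList none []).map String.ofList

-- ===== PRECONDITION & SPEC =====
def Spec_get_prot_seq_from_cds_py (prot_seq : String) (out : List String) : Prop := out = get_prot_seq_from_cds_py_alt prot_seq
instance (prot_seq : String) (out : List String) : Decidable (Spec_get_prot_seq_from_cds_py prot_seq out) := by unfold Spec_get_prot_seq_from_cds_py; infer_instance

-- ===== CLAIM (what is proved, stated in full; the proofs are below) =====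
def Claim_equal_get_prot_seq_from_cds_py : Prop := ∀ (prot_seq : String), Dom_get_prot_seq_from_cds_py prot_seq → Spec_get_prot_seq_from_cds_py prot_seq (get_prot_seq_from_cds_py prot_seq)

-- ===== LEMMAS AND PROOFS =====

/-- Reference form of Python split on a single-character separator. -/
def charSplit (ch : Char) (pre : List Char) : List Char → List (List Char)
  | [] => [pre]
  | c :: t => if c = ch then pre :: charSplit ch [] t else charSplit ch (pre ++ [c]) t

/-- Reference form of split(ch, 1). -/
def charSplit1 (ch : Char) (pre : List Char) : List Char → List (List Char)
  | [] => [pre]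
  | c :: t => if c = ch then [pre, t] else charSplit1 ch (pre ++ [c]) t

/-- The suffix after the first occurrence of `ch`, or [] if absent. -/
def restAfter (ch : Char) : List Char → List Char
  | [] => []
  | c :: t => if c = ch then t else restAfter ch t

/-- A's per-fragment contribution. -/
def procFrag (frag : List Char) : List (List Char) :=
  if 'M' ∈ frag then
    (if 0 < (restAfter 'M' frag).length then ['M' :: restAfter 'M' frag] else [])
  else []

theorem isIn_singleton (c : Char) (s : List Char) :
    PySem.Chars.isIn [c] s = true ↔ c ∈ s := by
  rw [PySem.Chars.isIn_iff_infix]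
  constructor
  · intro h; exact h.subset (by simp)
  · intro h
    obtain ⟨pre, suf, rfl⟩ := List.append_of_mem h
    exact ⟨pre, suf, by simp⟩

theorem splitOn_go_char (ch : Char) :
    ∀ (l : List Char) (fuel : Nat) (cur : List Char) (acc : List (List Char)),
      l.length < fuel →
      PySem.Chars.splitOn.go [ch] fuel l cur acc = acc.reverse ++ charSplit ch cur.reverse l := by
  intro l
  induction l with
  | nil =>
    intro fuel cur acc h
    match fuel, h with
    | fuel + 1, _ => simp [PySem.Chars.splitOn.go, charSplit]
  | cons c t ih =>
    intro fuel cur acc h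
    match fuel, h with
    | fuel + 1, h =>
      by_cases hc : c = ch
      · subst hc
        rw [show PySem.Chars.splitOn.go [c] (fuel+1) (c :: t) cur acc
              = PySem.Chars.splitOn.go [c] fuel t [] (cur.reverse :: acc) by
            simp [PySem.Chars.splitOn.go, List.isPrefixOf]]
        rw [ih fuel [] (cur.reverse :: acc) (by simpa using h)]
        simp [charSplit]
      · rw [show PySem.Chars.splitOn.go [ch] (fuel+1) (c :: t) cur acc
              = PySem.Chars.splitOn.go [ch] fuel t (c :: cur) acc by
            simp [PySem.Chars.splitOn.go, List.isPrefixOf, Ne.symm hc]]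
        rw [ih fuel (c :: cur) acc (by simpa using h)]
        simp [charSplit, hc]

theorem splitOn_char (ch : Char) (s : List Char) :
    PySem.Chars.splitOn s [ch] = charSplit ch [] s := by
  have := splitOn_go_char ch s (s.length + 1) [] [] (by omega)
  simpa [PySem.Chars.splitOn] using this

theorem splitOnMax_go_m0 (ch : Char) :
    ∀ (l : List Char) (fuel : Nat) (cur : List Char) (acc : List (List Char)),
      0 < fuel →
      PySem.Chars.splitOnMax.go [ch] fuel 0 l cur acc = acc.reverse ++ [cur.reverse ++ l] := by
  intro l fuel cur acc h
  match fuel, h with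
  | fuel + 1, _ =>
    cases l with
    | nil => simp [PySem.Chars.splitOnMax.go]
    | cons c t => simp [PySem.Chars.splitOnMax.go]

theorem splitOnMax_go_m1 (ch : Char) :
    ∀ (l : List Char) (fuel : Nat) (cur : List Char) (acc : List (List Char)),
      l.length < fuel →
      PySem.Chars.splitOnMax.go [ch] fuel 1 l cur acc = acc.reverse ++ charSplit1 ch cur.reverse l := by
  intro l
  induction l with
  | nil =>
    intro fuel cur acc h
    match fuel, h with
    | fuel + 1, _ => simp [PySem.Chars.splitOnMax.go, charSplit1]
  | cons c t ih =>
    intro fuel cur acc h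
    match fuel, h with
    | fuel + 1, h =>
      by_cases hc : c = ch
      · subst hc
        rw [show PySem.Chars.splitOnMax.go [c] (fuel+1) 1 (c :: t) cur acc
              = PySem.Chars.splitOnMax.go [c] fuel 0 t [] (cur.reverse :: acc) by
            simp [PySem.Chars.splitOnMax.go, List.isPrefixOf]]
        rw [splitOnMax_go_m0 c t fuel [] (cur.reverse :: acc)
              (by simp only [List.length_cons] at h; omega)]
        simp [charSplit1]
      · rw [show PySem.Chars.splitOnMax.go [ch] (fuel+1) 1 (c :: t) cur acc
              = PySem.Chars.splitOnMax.go [ch] fuel 1 t (c :: cur) acc by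
            simp [PySem.Chars.splitOnMax.go, List.isPrefixOf, Ne.symm hc]]
        rw [ih fuel (c :: cur) acc (by simpa using h)]
        simp [charSplit1, hc]

theorem splitOnMax_char (ch : Char) (s : List Char) :
    PySem.Chars.splitOnMax s [ch] 1 = charSplit1 ch [] s := by
  have := splitOnMax_go_m1 ch s (s.length + 1) [] [] (by omega)
  simpa [PySem.Chars.splitOnMax] using this

theorem pyGetD_charSplit1 (ch : Char) :
    ∀ (t pre : List Char), PySem.List.pyGetD (charSplit1 ch pre t) 1 [] = restAfter ch t := by
  intro t
  induction t with
  | nil => intro pre; simp [charSplit1, restAfter, PySem.List.pyGetD, PySem.List.pyGet?, PySem.List.pyIdx?]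
  | cons c t ih =>
    intro pre
    by_cases hc : c = ch
    · subst hc
      simp [charSplit1, restAfter, PySem.List.pyGetD, PySem.List.pyGet?, PySem.List.pyIdx?]
    · simp [charSplit1, restAfter, hc, ih]

/-- A's fold body equals `procFrag` appended. -/
theorem fold_body_eq (acc : List (List Char)) (frag : List Char) :
    (if PySem.Chars.isIn ['M'] frag then
      if 0 < (PySem.List.pyGetD (PySem.Chars.splitOnMax frag ['M'] 1) 1 []).length then
        acc ++ ['M' :: PySem.List.pyGetD (PySem.Chars.splitOnMax frag ['M'] 1) 1 []]
      else acc
    else acc) = acc ++ procFrag frag := by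
  rw [splitOnMax_char, pyGetD_charSplit1]
  unfold procFrag
  by_cases hM : 'M' ∈ frag
  · rw [if_pos ((isIn_singleton 'M' frag).mpr hM), if_pos hM]
    split <;> simp
  · rw [if_neg (by rw [isIn_singleton]; exact hM), if_neg hM]
    simp

theorem charSplit_no_sep (ch : Char) :
    ∀ (l pre : List Char), ch ∉ l → charSplit ch pre l = [pre ++ l] := by
  intro l
  induction l with
  | nil => intro pre _; simp [charSplit]
  | cons c t ih =>
    intro pre h
    have hc : c ≠ ch := fun hh => h (hh ▸ List.mem_cons_self)
    simp [charSplit, hc, ih (pre ++ [c]) (fun hm => h (List.mem_cons_of_mem _ hm))]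

theorem charSplit_append (ch : Char) :
    ∀ (seg pre rest : List Char), ch ∉ seg →
      charSplit ch pre (seg ++ ch :: rest) = (pre ++ seg) :: charSplit ch [] rest := by
  intro seg
  induction seg with
  | nil => intro pre rest _; simp [charSplit]
  | cons c t ih =>
    intro pre rest h
    have hc : c ≠ ch := fun hh => h (hh ▸ List.mem_cons_self)
    simp only [List.cons_append, charSplit, if_neg hc]
    rw [ih (pre ++ [c]) rest (fun hm => h (List.mem_cons_of_mem _ hm))]
    simp

theorem charSplit_ne_nil (ch : Char) (pre l : List Char) : charSplit ch pre l ≠ [] := by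
  induction l generalizing pre with
  | nil => simp [charSplit]
  | cons c t ih => by_cases hc : c = ch <;> simp [charSplit, hc, ih]

theorem pop_neg_one {α : Type} (l : List α) (h : l ≠ []) :
    ∃ x, PySem.List.pop? l (-1) = some (x, l.dropLast) := by
  rcases List.eq_nil_or_concat l with rfl | ⟨xs, x, rfl⟩
  · exact absurd rfl h
  · simp only [List.concat_eq_append]
    exact ⟨x, by rw [PySem.List.pop?_last]; simp⟩

/-- Characterisation of port A through `charSplit`. -/
theorem portACore_eq (s : List Char) :
    portACore s = if '*' ∈ s then ((charSplit '*' [] s).dropLast).flatMap procFrag else [] := by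
  unfold portACore
  by_cases h : '*' ∈ s
  · rw [if_pos ((isIn_singleton '*' s).mpr h), if_pos h]
    simp only [splitOn_char]
    obtain ⟨x, hx⟩ := pop_neg_one _ (charSplit_ne_nil '*' [] s)
    rw [hx]
    dsimp only
    rw [show (fun (acc : List (List Char)) (frag : List Char) =>
        if PySem.Chars.isIn ['M'] frag then
          if 0 < (PySem.List.pyGetD (PySem.Chars.splitOnMax frag ['M'] 1) 1 []).length then
            acc ++ ['M' :: PySem.List.pyGetD (PySem.Chars.splitOnMax frag ['M'] 1) 1 []]
          else acc
        else acc) = (fun acc frag => acc ++ procFrag frag) from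
      funext fun acc => funext fun frag => fold_body_eq acc frag]
    rw [PySem.List.foldl_append_eq_flatMap]
    simp
  · rw [if_neg (by rw [isIn_singleton]; exact h), if_neg h]

-- ===== B-side lemmas =====

theorem portB_no_star :
    ∀ (l : List Char) (buf : Option (List Char)) (acc : List (List Char)),
      '*' ∉ l → portBCore l buf acc = acc := by
  intro l
  induction l with
  | nil => intro buf acc _; rfl
  | cons c t ih =>
    intro buf acc h
    have hc : c ≠ '*' := fun hh => h (hh ▸ List.mem_cons_self)
    have ht : '*' ∉ t := fun hm => h (List.mem_cons_of_mem _ hm)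
    cases buf with
    | none =>
      by_cases hM : c = 'M' <;> simp [portBCore, hc, hM, ih _ _ ht]
    | some b => simp [portBCore, hc, ih _ _ ht]

theorem portB_buf :
    ∀ (seg : List Char) (b : List Char) (rest : List Char) (acc : List (List Char)),
      '*' ∉ seg →
      portBCore (seg ++ '*' :: rest) (some b) acc =
        portBCore rest none (acc ++ if 1 < (b ++ seg).length then [b ++ seg] else []) := by
  intro seg
  induction seg with
  | nil =>
    intro b rest acc _
    by_cases hb : 1 < b.length <;> simp [portBCore, hb]
  | cons c t ih =>
    intro b rest acc h
    have hc : c ≠ '*' := fun hh => h (hh ▸ List.mem_cons_self)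
    have ht : '*' ∉ t := fun hm => h (List.mem_cons_of_mem _ hm)
    simp only [List.cons_append, portBCore, if_neg hc]
    rw [ih (b ++ [c]) rest acc ht]
    simp

theorem restAfter_length_pos_iff (t : List Char) :
    (0 < (restAfter 'M' ('M' :: t)).length) ↔ t ≠ [] := by
  simp [restAfter, List.length_pos_iff]

theorem portB_seg :
    ∀ (seg rest : List Char) (acc : List (List Char)),
      '*' ∉ seg →
      portBCore (seg ++ '*' :: rest) none acc = portBCore rest none (acc ++ procFrag seg) := by
  intro seg
  induction seg with
  | nil => intro rest acc _; simp [portBCore, procFrag]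
  | cons c t ih =>
    intro rest acc h
    have hc : c ≠ '*' := fun hh => h (hh ▸ List.mem_cons_self)
    have ht : '*' ∉ t := fun hm => h (List.mem_cons_of_mem _ hm)
    by_cases hM : c = 'M'
    · subst hM
      simp only [List.cons_append, portBCore, if_neg hc]
      rw [if_pos trivial, portB_buf t ['M'] rest acc ht]
      have : procFrag ('M' :: t) = if 1 < (['M'] ++ t).length then [['M'] ++ t] else [] := by
        unfold procFrag
        rw [if_pos List.mem_cons_self]
        by_cases hnil : t = []
        · subst hnil; simp [restAfter]
        · rw [if_pos ((restAfter_length_pos_iff t).mpr hnil)]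
          have : restAfter 'M' ('M' :: t) = t := by simp [restAfter]
          rw [this, if_pos (by simp [List.length_pos_iff, hnil])]
          simp
      rw [this]
    · simp only [List.cons_append, portBCore, if_neg hc, if_neg hM]
      rw [ih rest acc ht]
      have : procFrag (c :: t) = procFrag t := by
        unfold procFrag
        have h1 : ('M' ∈ c :: t) ↔ 'M' ∈ t := by simp [Ne.symm hM]
        have h2 : restAfter 'M' (c :: t) = restAfter 'M' t := by simp [restAfter, hM]
        rw [h2]
        by_cases hm : 'M' ∈ t
        · rw [if_pos (h1.mpr hm), if_pos hm]
        · rw [if_neg (fun hh => hm (h1.mp hh)), if_neg hm]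
      rw [this]

/-- First-occurrence decomposition. -/
theorem first_star (s : List Char) (h : '*' ∈ s) :
    ∃ seg rest, s = seg ++ '*' :: rest ∧ '*' ∉ seg := by
  induction s with
  | nil => cases h
  | cons c t ih =>
    by_cases hc : c = '*'
    · exact ⟨[], t, by simp [hc], by simp⟩
    · obtain ⟨seg, rest, rfl, hseg⟩ := ih (by rcases List.mem_cons.mp h with h1 | h1
                                              · exact absurd h1.symm hc
                                              · exact h1)
      exact ⟨c :: seg, rest, rfl, by simp [hseg, Ne.symm hc]⟩

/-- Main invariant: B from a fresh buffer appends exactly A's result. -/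
theorem portB_eq_portA : ∀ (s : List Char) (acc : List (List Char)),
    portBCore s none acc = acc ++ portACore s := by
  intro s
  induction hn : s.length using Nat.strong_induction_on generalizing s with
  | _ n ih =>
    intro acc
    by_cases h : '*' ∈ s
    · obtain ⟨seg, rest, rfl, hseg⟩ := first_star s h
      rw [portB_seg seg rest acc hseg]
      rw [portACore_eq, if_pos h, charSplit_append '*' seg [] rest hseg]
      subst hn
      rw [ih rest.length (by simp; omega) rest rfl (acc ++ procFrag seg)]
      rw [portACore_eq]
      by_cases hr : '*' ∈ rest
      · rw [if_pos hr]
        rw [List.dropLast_cons_of_ne_nil (charSplit_ne_nil '*' [] rest)]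
        simp
      · rw [if_neg hr, charSplit_no_sep '*' rest [] hr]
        simp
    · rw [portB_no_star s none acc h, portACore_eq, if_neg h, List.append_nil]

-- ===== VERDICT (by name: the statement is the Claim_ definition above) =====
theorem get_prot_seq_from_cds_py_spec : Claim_equal_get_prot_seq_from_cds_py := by
  intro s _
  unfold Spec_get_prot_seq_from_cds_py get_prot_seq_from_cds_py get_prot_seq_from_cds_py_alt
  rw [portB_eq_portA s.toList []]
  simp
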